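-- pv_equiv track=rewrite | github.com/rapturt9/ai-forecasts | src/manifold_markets/enhanced_market_agent.py | _assess_time_sensitivity
-- ===== SOURCE A (Python) =====
-- from typing import Dict, List, Optional, Tuple, Any
--
-- def _assess_time_sensitivity(trading_signals: List[Dict]) -> str:
--     """Assess time sensitivity of the trading opportunity"""
--     arbitrage_signals = [s for s in trading_signals if s['type'] == 'arbitrage']
--     if arbitrage_signals:
--         return "high"
--
--     momentum_signals = [s for s in trading_signals if 'momentum' in s['type']]
--     if momentum_signals:
--         return "medium"
--
--     return "low"
-- ===== SOURCE B (Python) =====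
-- def _assess_time_sensitivity(trading_signals):
--     """Assess time sensitivity: rank each signal numerically and take the maximum."""
--     rank = max((2 if s['type'] == 'arbitrage' else 1 if 'momentum' in s['type'] else 0
--                 for s in trading_signals), default=0)
--     return ('low', 'medium', 'high')[rank]
-- ===== Notes on version B (the rewrite author's own statement) =====
-- stated objective: alternative
-- what changed: Instead of A's two staged comprehension scans with early returns, B maps every signal to a numeric urgency rank (arbitrage=2, momentum=1, else 0), folds a single max over them, and indexes a level table by that rank.
import Mathlib
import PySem

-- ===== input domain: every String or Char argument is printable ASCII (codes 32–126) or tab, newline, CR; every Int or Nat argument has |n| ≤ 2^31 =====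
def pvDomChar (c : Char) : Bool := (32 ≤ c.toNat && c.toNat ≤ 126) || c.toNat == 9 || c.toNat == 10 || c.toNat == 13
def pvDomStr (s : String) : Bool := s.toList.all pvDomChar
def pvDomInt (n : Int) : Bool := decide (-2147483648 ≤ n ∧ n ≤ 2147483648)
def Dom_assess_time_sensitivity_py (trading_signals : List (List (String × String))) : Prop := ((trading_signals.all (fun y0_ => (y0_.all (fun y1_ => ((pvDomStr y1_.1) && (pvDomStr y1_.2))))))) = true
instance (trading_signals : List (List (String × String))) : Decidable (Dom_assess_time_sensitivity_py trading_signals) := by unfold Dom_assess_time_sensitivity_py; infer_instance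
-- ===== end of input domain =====

-- B replaces A's two staged comprehension scans with a numeric rank per signal, one max-fold, and a table lookup (objective: alternative).

-- ===== PORT A =====
-- s['type'] : first-match lookup in the association list; Pre_ guarantees the key exists.
def pvTypeOf (s : List (String × String)) : String := ((PySem.Dict.mk s).get? "type").getD ""

def assess_time_sensitivity_py (trading_signals : List (List (String × String))) : String :=
  let arbitrage_signals := trading_signals.filter (fun s => pvTypeOf s == "arbitrage")
  if arbitrage_signals ≠ [] then "high"
  else
    let momentum_signals := trading_signals.filter (fun s => PySem.Str.isIn "momentum" (pvTypeOf s))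
    if momentum_signals ≠ [] then "medium"
    else "low"

-- ===== PORT B =====
-- urgency rank of one signal: arbitrage → 2, momentum-containing → 1, otherwise 0
def pvRankOf (s : List (String × String)) : Nat :=
  if pvTypeOf s == "arbitrage" then 2
  else if PySem.Str.isIn "momentum" (pvTypeOf s) then 1
  else 0

def assess_time_sensitivity_py_alt (trading_signals : List (List (String × String))) : String :=
  let rank := trading_signals.foldl (fun m s => max m (pvRankOf s)) 0   -- max(…, default=0)
  ["low", "medium", "high"].getD rank ""                                -- ('low','medium','high')[rank]

-- ===== PRECONDITION & SPEC =====
-- Pre_ excludes exactly the inputs where some signal lacks the 'type' key, on which Python A raises KeyError.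
def Pre_assess_time_sensitivity_py (trading_signals : List (List (String × String))) : Prop :=
  (trading_signals.all (fun s => s.any (fun p => p.1 == "type"))) = true
instance (trading_signals : List (List (String × String))) : Decidable (Pre_assess_time_sensitivity_py trading_signals) := by unfold Pre_assess_time_sensitivity_py; infer_instance
def pvWitness_assess_time_sensitivity_py : (List (List (String × String))) := [[("type", "arbitrage")], [("type", "momentum_shift")]]

def Spec_assess_time_sensitivity_py (trading_signals : List (List (String × String))) (out : String) : Prop := out = assess_time_sensitivity_py_alt trading_signals
instance (trading_signals : List (List (String × String))) (out : String) : Decidable (Spec_assess_time_sensitivity_py trading_signals out) := by unfold Spec_assess_time_sensitivity_py; infer_instance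

-- ===== CLAIM (what is proved, stated in full; the proofs are below) =====
def Claim_equal_assess_time_sensitivity_py : Prop := ∀ (trading_signals : List (List (String × String))), Dom_assess_time_sensitivity_py trading_signals → Pre_assess_time_sensitivity_py trading_signals → Spec_assess_time_sensitivity_py trading_signals (assess_time_sensitivity_py trading_signals)

-- ===== LEMMAS AND PROOFS =====

-- the staged description of the maximum rank
def pvMaxRank (xs : List (List (String × String))) : Nat :=
  if xs.any (fun s => pvTypeOf s == "arbitrage") then 2
  else if xs.any (fun s => PySem.Str.isIn "momentum" (pvTypeOf s)) then 1
  else 0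

theorem maxRank_cons (x : List (String × String)) (xs : List (List (String × String))) :
    pvMaxRank (x :: xs) = max (pvRankOf x) (pvMaxRank xs) := by
  by_cases ha : (pvTypeOf x == "arbitrage") = true <;>
  by_cases hm : (PySem.Str.isIn "momentum" (pvTypeOf x)) = true <;>
  by_cases hA : (xs.any (fun s => pvTypeOf s == "arbitrage")) = true <;>
  by_cases hM : (xs.any (fun s => PySem.Str.isIn "momentum" (pvTypeOf s))) = true <;>
    simp [pvMaxRank, pvRankOf, List.any_cons, ha, hm, hA, hM]
  all_goals (split_ifs <;> first | omega | simp_all [PySem.Str.isIn, List.any_eq_true])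

theorem fold_maxRank (xs : List (List (String × String))) (a : Nat) :
    xs.foldl (fun m s => max m (pvRankOf s)) a = max a (pvMaxRank xs) := by
  induction xs generalizing a with
  | nil => simp [pvMaxRank]
  | cons x xs ih =>
    simp only [List.foldl_cons, ih, maxRank_cons]
    omega

-- a comprehension-built list is nonempty iff some element satisfies the predicate
theorem filter_ne_nil_iff_any {α : Type} (p : α → Bool) (l : List α) :
    (l.filter p ≠ []) ↔ l.any p = true := by
  rw [Ne, List.filter_eq_nil_iff]
  push Not
  simp [List.any_eq_true]

theorem assess_time_sensitivity_py_spec : Claim_equal_assess_time_sensitivity_py := by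
  intro ts _ _
  unfold Spec_assess_time_sensitivity_py assess_time_sensitivity_py assess_time_sensitivity_py_alt
  simp only [fold_maxRank, Nat.zero_max, filter_ne_nil_iff_any, pvMaxRank]
  split_ifs <;> rfl
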